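-- pv_equiv track=rewrite | github.com/Miravalier/serialib | generate.py | join_iterate
-- ===== SOURCE A (Python) =====
-- def join_iterate(seq):
--     seq = iter(seq)
--     try:
--         item = next(seq)
--     except StopIteration:
--         return
--
--     while True:
--         try:
--             next_item = next(seq)
--             yield item, False
--             item = next_item
--         except StopIteration:
--             yield item, True
--             return
-- ===== SOURCE B (Python) =====
-- def join_iterate(seq):
--     items = list(seq)
--     for i, item in enumerate(items):
--         yield item, i == len(items) - 1
-- ===== Notes on version B (the rewrite author's own statement) =====
-- stated objective: simpler
-- what changed: Replaces the one-element lookahead state machine over an iterator with materializing the sequence and flagging by index (i == len-1) via enumerate.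
import Mathlib
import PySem

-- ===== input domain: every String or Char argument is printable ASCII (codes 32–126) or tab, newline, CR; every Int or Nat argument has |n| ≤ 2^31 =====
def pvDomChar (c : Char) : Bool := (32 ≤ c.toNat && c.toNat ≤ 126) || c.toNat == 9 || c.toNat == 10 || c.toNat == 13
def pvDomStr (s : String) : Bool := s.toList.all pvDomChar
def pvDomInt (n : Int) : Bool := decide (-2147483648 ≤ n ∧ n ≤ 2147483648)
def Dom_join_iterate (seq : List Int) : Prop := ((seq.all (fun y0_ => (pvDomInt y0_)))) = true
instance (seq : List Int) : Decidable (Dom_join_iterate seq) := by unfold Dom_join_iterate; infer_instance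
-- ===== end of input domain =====

-- B is simpler: index/length flagging instead of A's lookahead state machine; generator laziness is not modelled (return value only).

-- ===== PORT A =====
-- A: take the first item, then loop: peek the next item; if present yield (item, False), else yield (item, True) and stop.
def joinIterateLoop (item : Int) (rest : List Int) : List (Int × Bool) :=
  match rest with
  | [] => [(item, true)]
  | next_item :: rest' => (item, false) :: joinIterateLoop next_item rest'

def join_iterate (seq : List Int) : List (Int × Bool) :=
  match seq with
  | [] => []
  | item :: rest => joinIterateLoop item rest

-- ===== PORT B =====
-- B: materialize, then flag each item by i == len - 1 via enumerate.
def join_iterate_alt (seq : List Int) : List (Int × Bool) :=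
  (PySem.List.enumerate seq).map (fun p => (p.2, decide (p.1 = (seq.length : Int) - 1)))

-- ===== PRECONDITION & SPEC =====
def Spec_join_iterate (seq : List Int) (out : List (Int × Bool)) : Prop := out = join_iterate_alt seq
instance (seq : List Int) (out : List (Int × Bool)) : Decidable (Spec_join_iterate seq out) := by unfold Spec_join_iterate; infer_instance

-- ===== CLAIM (what is proved, stated in full; the proofs are below) =====
def Claim_equal_join_iterate : Prop := ∀ (seq : List Int), Dom_join_iterate seq → Spec_join_iterate seq (join_iterate seq)

-- ===== LEMMAS AND PROOFS =====
theorem joinIterateLoop_eq (rest : List Int) : ∀ (item : Int) (s : Int),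
    joinIterateLoop item rest =
      (PySem.List.enumerate (item :: rest) s).map
        (fun p => (p.2, decide (p.1 = s + (rest.length : Int)))) := by
  induction rest with
  | nil => intro item s; simp [joinIterateLoop, PySem.List.enumerate_cons, PySem.List.enumerate_nil]
  | cons x xs ih =>
    intro item s
    rw [show joinIterateLoop item (x :: xs) = (item, false) :: joinIterateLoop x xs from rfl]
    rw [PySem.List.enumerate_cons, List.map_cons]
    congr 1
    · simp only [List.length_cons, Prod.mk.injEq, true_and]
      symm
      rw [decide_eq_false_iff_not]
      push_cast
      omega
    · rw [ih x (s + 1)]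
      congr 1
      funext p
      simp only [List.length_cons, Prod.mk.injEq, true_and]
      rw [decide_eq_decide]
      push_cast
      omega

-- ===== VERDICT (by name: the statement is the Claim_ definition above) =====
theorem join_iterate_spec : Claim_equal_join_iterate := by
  intro seq _
  unfold Spec_join_iterate
  cases seq with
  | nil => rfl
  | cons item rest =>
    show joinIterateLoop item rest = join_iterate_alt (item :: rest)
    unfold join_iterate_alt
    rw [joinIterateLoop_eq rest item 0]
    congr 1
    funext p
    simp only [List.length_cons, Prod.mk.injEq, true_and]
    rw [decide_eq_decide]
    push_cast
    omega
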